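-- pv_equiv track=rewrite | github.com/lvclark/polyRAD | inst/python/process_sam_multi.py | pad_marker
-- ===== SOURCE A (Python) =====
-- def pad_marker(old_mnames, new_mnames, alignlist):
--   '''Function for padding out marker information, if the tag aligned to fewer
--   locations than the tags it is being grouped with.
--   old_mnames and new_mnames are tuples of alignment locations.
--   alignlist is formatted as an element of aligndict.'''
--   dummy_NM = 999 # what NM should be if there is not an actual alignment
--   m_index = [new_mnames.index(m) for m in old_mnames]
--   nalign = len(new_mnames)
--   new_alignlist = []
--   for aligninfo in alignlist:
--     new_NM = [dummy_NM for i in range(nalign)]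
--     new_CIGAR = ['' for i in range(nalign)] ### Add stuff for MD
--     for i in range(len(m_index)):
--       mi = m_index[i]
--       new_NM[mi] = aligninfo[1][i]
--       new_CIGAR[mi] = aligninfo[2][i]
--     new_NM = tuple(new_NM)
--     new_CIGAR = tuple(new_CIGAR)
--     new_alignlist.append((aligninfo[0], new_NM, new_CIGAR))
--   return new_alignlist
-- ===== SOURCE B (Python) =====
-- def pad_marker(old_mnames, new_mnames, alignlist):
--   '''Pad alignment info out to the new marker set by GATHERING per new slot:
--   build a reverse map new-index -> old-index once (later duplicates overwrite,
--   i.e. last write wins), then construct each padded tuple directly.'''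
--   dummy_NM = 999
--   nalign = len(new_mnames)
--   pos_map = {}  # new index -> old index it is filled from
--   for i, m in enumerate(old_mnames):
--     pos_map[new_mnames.index(m)] = i  # still raises ValueError on a missing marker
--   return [(name,
--            tuple(NM[pos_map[j]] if j in pos_map else dummy_NM for j in range(nalign)),
--            tuple(CIGAR[pos_map[j]] if j in pos_map else '' for j in range(nalign)))
--           for name, NM, CIGAR in alignlist]
-- ===== Notes on version B (the rewrite author's own statement) =====
-- stated objective: alternative
-- what changed: Replaces A's scatter (pre-fill dummy arrays, then write old values at new indices) by a gather: one reverse map from new index to old index is built once, and each padded tuple is constructed directly by a comprehension over the new slots, with no mutable pre-filled arrays.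
import Mathlib
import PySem

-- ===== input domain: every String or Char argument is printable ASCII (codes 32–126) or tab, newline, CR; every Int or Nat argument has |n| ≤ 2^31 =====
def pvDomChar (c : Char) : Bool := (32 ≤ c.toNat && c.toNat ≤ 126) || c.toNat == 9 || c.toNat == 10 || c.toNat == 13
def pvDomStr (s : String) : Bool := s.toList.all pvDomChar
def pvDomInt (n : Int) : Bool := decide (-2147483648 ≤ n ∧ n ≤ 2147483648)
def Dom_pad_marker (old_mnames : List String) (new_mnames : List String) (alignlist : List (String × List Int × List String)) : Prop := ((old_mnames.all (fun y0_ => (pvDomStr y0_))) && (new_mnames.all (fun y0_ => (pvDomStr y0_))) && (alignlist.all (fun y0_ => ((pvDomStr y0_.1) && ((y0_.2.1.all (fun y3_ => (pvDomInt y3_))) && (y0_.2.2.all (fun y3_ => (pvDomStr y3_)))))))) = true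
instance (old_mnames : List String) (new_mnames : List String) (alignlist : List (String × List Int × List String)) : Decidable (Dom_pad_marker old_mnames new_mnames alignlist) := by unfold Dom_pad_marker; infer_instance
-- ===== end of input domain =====

-- B replaces A's scatter (pre-filled dummy arrays, written at old-marker indices) by a gather
-- through a reverse map new-index -> old-index; objective: alternative algorithm, same cost.

-- ===== PORT A =====
-- Literal port of A. Python raises where the port falls back to a default, and Pre_ excludes
-- exactly those inputs: `.index(m)` (ValueError when m ∉ new_mnames; port: index? … |>.getD 0)
-- and `aligninfo[1][i]` / `aligninfo[2][i]` (IndexError when the lists are shorter than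
-- old_mnames; port: List.getD with the unreachable defaults 999 / "").
def pad_marker (old_mnames : List String) (new_mnames : List String) (alignlist : List (String × List Int × List String)) : List (String × List Int × List String) :=
  let m_index : List Nat := old_mnames.map (fun m => (PySem.List.index? new_mnames m).getD 0)
  let nalign : Nat := new_mnames.length
  alignlist.foldl (fun new_alignlist aligninfo =>
    let st : List Int × List String :=
      (List.range m_index.length).foldl
        (fun (st : List Int × List String) i =>
          (st.1.set (m_index.getD i 0) (aligninfo.2.1.getD i 999),
           st.2.set (m_index.getD i 0) (aligninfo.2.2.getD i "")))
        (List.replicate nalign 999, List.replicate nalign "")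
    new_alignlist ++ [(aligninfo.1, st.1, st.2)]) []

-- ===== PORT B =====
-- Literal port of Source B. Same totalized raise points as in A's port: index? … |>.getD 0 for
-- `.index` and List.getD for `NM[pos_map[j]]` / `CIGAR[pos_map[j]]`; `j in pos_map` + lookup
-- is the match on pos_map.get? j.
def pad_marker_alt (old_mnames : List String) (new_mnames : List String) (alignlist : List (String × List Int × List String)) : List (String × List Int × List String) :=
  let nalign : Nat := new_mnames.length
  let pos_map : PySem.Dict Nat Nat :=
    (PySem.List.enumerate old_mnames 0).foldl
      (fun d p => d.insert ((PySem.List.index? new_mnames p.2).getD 0) p.1.toNat)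
      PySem.Dict.empty
  alignlist.map (fun a =>
    (a.1,
     (List.range nalign).map (fun j =>
       match pos_map.get? j with
       | some i => a.2.1.getD i 999
       | none => 999),
     (List.range nalign).map (fun j =>
       match pos_map.get? j with
       | some i => a.2.2.getD i ""
       | none => "")))

-- ===== PRECONDITION & SPEC =====
-- Exactly the inputs on which Python A returns: every old marker occurs in new_mnames
-- (else .index raises ValueError) and each aligninfo carries at least len(old_mnames)
-- NM values and CIGAR strings (else aligninfo[1][i]/aligninfo[2][i] raises IndexError).
def Pre_pad_marker (old_mnames : List String) (new_mnames : List String) (alignlist : List (String × List Int × List String)) : Prop :=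
  (∀ m ∈ old_mnames, m ∈ new_mnames) ∧
  (∀ a ∈ alignlist, old_mnames.length ≤ a.2.1.length ∧ old_mnames.length ≤ a.2.2.length)
instance (old_mnames : List String) (new_mnames : List String) (alignlist : List (String × List Int × List String)) : Decidable (Pre_pad_marker old_mnames new_mnames alignlist) := by unfold Pre_pad_marker; infer_instance

def pvWitness_pad_marker : List String × List String × (List (String × List Int × List String)) :=
  (["a", "b"], ["b", "c", "a"], [("t1", [3, 7], ["2M", "1D"]), ("t2", [0, 1], ["", "5M"])])

def Spec_pad_marker (old_mnames : List String) (new_mnames : List String) (alignlist : List (String × List Int × List String)) (out : List (String × List Int × List String)) : Prop := out = pad_marker_alt old_mnames new_mnames alignlist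
instance (old_mnames : List String) (new_mnames : List String) (alignlist : List (String × List Int × List String)) (out : List (String × List Int × List String)) : Decidable (Spec_pad_marker old_mnames new_mnames alignlist out) := by unfold Spec_pad_marker; infer_instance

-- ===== CLAIM (what is proved, stated in full; the proofs are below) =====
def Claim_equal_pad_marker : Prop := ∀ (old_mnames : List String) (new_mnames : List String) (alignlist : List (String × List Int × List String)), Dom_pad_marker old_mnames new_mnames alignlist → Pre_pad_marker old_mnames new_mnames alignlist → Spec_pad_marker old_mnames new_mnames alignlist (pad_marker old_mnames new_mnames alignlist)

-- ===== LEMMAS AND PROOFS =====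

-- a scatter loop of `set`s preserves the list length
lemma scatter_length {α : Type} (f : Nat → α) (qs : List (Nat × Nat)) (init : List α) :
    (qs.foldl (fun l q => l.set q.1 (f q.2)) init).length = init.length := by
  induction qs generalizing init with
  | nil => rfl
  | cons q qs ih => simpa [List.foldl_cons] using ih (init.set q.1 (f q.2)) |>.trans (by simp)

-- the scatter loop, read back at slot j, is the gather through the last-write-wins dict
lemma scatter_vs_dict {α : Type} (f : Nat → α) (dflt : α) (qs : List (Nat × Nat)) (init : List α)
    (hb : ∀ q ∈ qs, q.1 < init.length) (j : Nat) :
    (qs.foldl (fun l q => l.set q.1 (f q.2)) init).getD j dflt =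
      (match (qs.foldl (fun d q => d.insert q.1 q.2) (PySem.Dict.empty : PySem.Dict Nat Nat)).get? j with
       | some i => f i
       | none => init.getD j dflt) := by
  induction qs using List.reverseRecOn with
  | nil => simp [PySem.Dict.get?_empty]
  | append_singleton qs q ih =>
      simp only [List.foldl_append, List.foldl_cons, List.foldl_nil]
      rw [PySem.Dict.get?_insert]
      by_cases hj : j = q.1
      · have hlt : q.1 < (qs.foldl (fun l q => l.set q.1 (f q.2)) init).length := by
          rw [scatter_length]; exact hb q (by simp)
        simp [hj, List.getD_eq_getElem?_getD, hlt]
      · rw [List.getD_eq_getElem?_getD, List.getElem?_set_ne (fun h => hj h.symm),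
            ← List.getD_eq_getElem?_getD, ih (fun p hp => hb p (by simp [hp]))]
        simp [hj]

theorem pad_marker_spec : Claim_equal_pad_marker := by
  intro old_mnames new_mnames alignlist _ hpre
  unfold Spec_pad_marker
  obtain ⟨hmem, hlen⟩ := hpre
  simp only [pad_marker, pad_marker_alt]
  rw [PySem.List.foldl_append_singleton_eq_map]
  apply List.map_congr_left
  intro a ha
  -- shared index pairs: (new slot written, old position it came from)
  set m_index : List Nat := old_mnames.map (fun m => (PySem.List.index? new_mnames m).getD 0) with hm
  set qs : List (Nat × Nat) := (List.range m_index.length).map (fun i => (m_index.getD i 0, i)) with hqs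
  have hq_enum : qs = (PySem.List.enumerate old_mnames 0).map
      (fun p => ((PySem.List.index? new_mnames p.2).getD 0, p.1.toNat)) := by
    apply List.ext_getElem
    · simp [hqs, hm, PySem.List.length_enumerate]
    · intro k h1 h2
      have hk : k < old_mnames.length := by
        simpa [hqs, hm] using h1
      simp [hqs, hm, PySem.List.getElem_enumerate, List.getD_eq_getElem?_getD,
            List.getElem?_map, List.getElem?_eq_getElem hk]
  have hb : ∀ q ∈ qs, q.1 < new_mnames.length := by
    intro q hq
    rw [hqs] at hq
    simp only [List.mem_map, List.mem_range] at hq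
    obtain ⟨i, hi, rfl⟩ := hq
    simp only [hm, List.length_map] at hi
    have hgi : m_index.getD i 0 = (PySem.List.index? new_mnames old_mnames[i]).getD 0 := by
      simp [hm, List.getD_eq_getElem?_getD, List.getElem?_map, List.getElem?_eq_getElem hi]
    rw [hgi]
    have hmemi : old_mnames[i] ∈ new_mnames := hmem _ (List.getElem_mem hi)
    obtain ⟨k, hk⟩ := Option.isSome_iff_exists.mp
      ((PySem.List.index?_isSome_iff (xs := new_mnames) (v := old_mnames[i])).2 hmemi)
    obtain ⟨hklt, -, -⟩ := PySem.List.getElem_of_index?_eq_some hk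
    rw [hk]; simpa using hklt
  -- both components, one slot at a time
  rw [PySem.List.foldl_prod_mk
        (f := fun (s : List Int) i => s.set (m_index.getD i 0) (a.2.1.getD i 999))
        (g := fun (s : List String) i => s.set (m_index.getD i 0) (a.2.2.getD i ""))]
  have hcomp : ∀ {α : Type} (f : Nat → α) (dflt : α),
      (List.range m_index.length).foldl
        (fun (l : List α) i => l.set (m_index.getD i 0) (f i))
        (List.replicate new_mnames.length dflt) =
      (List.range new_mnames.length).map (fun j =>
        match ((PySem.List.enumerate old_mnames 0).foldl
            (fun d p => d.insert ((PySem.List.index? new_mnames p.2).getD 0) p.1.toNat)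
            PySem.Dict.empty).get? j with
        | some i => f i
        | none => dflt) := by
    intro α f dflt
    have hrw : (List.range m_index.length).foldl
        (fun (l : List α) i => l.set (m_index.getD i 0) (f i))
        (List.replicate new_mnames.length dflt) =
        qs.foldl (fun l q => l.set q.1 (f q.2)) (List.replicate new_mnames.length dflt) := by
      rw [hqs, List.foldl_map]
    have hdictrw : (PySem.List.enumerate old_mnames 0).foldl
        (fun d p => d.insert ((PySem.List.index? new_mnames p.2).getD 0) p.1.toNat)
        PySem.Dict.empty =
        qs.foldl (fun d q => d.insert q.1 q.2) PySem.Dict.empty := by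
      rw [hq_enum, List.foldl_map]
    rw [hrw, hdictrw]
    apply List.ext_getElem
    · rw [scatter_length]; simp
    · intro k h1 h2
      have hk : k < new_mnames.length := by
        rw [scatter_length] at h1; simpa using h1
      rw [← List.getD_eq_getElem _ dflt]
      rw [scatter_vs_dict f dflt qs _ (by simpa using hb) k]
      rcases hD : (qs.foldl (fun d q => d.insert q.1 q.2) (PySem.Dict.empty : PySem.Dict Nat Nat)).get? k with _ | i <;>
        simp [hD, hk, List.getD_eq_getElem?_getD]
  exact Prod.ext rfl (Prod.ext (hcomp (fun i => a.2.1.getD i 999) 999) (hcomp (fun i => a.2.2.getD i "") ""))
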